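-- pv_equiv track=rewrite | github.com/MarkCarbonell98/UniSecondSemester | algorithmen_und_datenstrukturen/ubungen/ubung10/graphen-suche.py | undirected_cycle_test
-- ===== SOURCE A (Python) =====
-- def undirected_cycle_test(graph):         # Annahme: der Graph ist zusammenhängend
--                                           # (andernfalls führe den Algorithmus für jede Zusammenhangskomponente aus)
--     visited = [False]*len(graph)          # Flags für bereits besuchte Knoten
--
--     def visit(node, from_node):           # rekursive Hilfsfunktion: gibt True zurück, wenn Zyklus gefunden wurde
--         if not visited[node]:             # wenn node noch nicht besucht wurde
--             visited[node] = True          # markiere node als besucht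
--             for neighbor in graph[node]:  # besuche die Nachbarn ...
--                 if neighbor == from_node: # ... aber überspringe den Vaterknoten
--                     continue
--                 if visit(neighbor, node): # ... signalisiere, wenn rekursiv ein Zyklus gefunden wurde
--                     return True
--             return False                  # kein Zyklus gefunden
--         else:
--             return True                   # Knoten schon besucht => Zyklus
--
--     startnode = 0                         # starte bei beliebigem Knoten (hier: Knoten 0)
--     return visit(startnode, startnode)    # gebe True zurück, wenn ein Zyklus gefunden wurde
-- ===== SOURCE B (Python) =====
-- def undirected_cycle_test(graph):
--     visited = [False] * len(graph)
--     stack = [(0, 0)]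
--     while stack:
--         node, parent = stack.pop()
--         if visited[node]:
--             return True
--         visited[node] = True
--         for neighbor in reversed(graph[node]):
--             if neighbor != parent:
--                 stack.append((neighbor, node))
--     return False
-- ===== Notes on version B (the rewrite author's own statement) =====
-- stated objective: alternative
-- what changed: The recursive DFS with an inner visit() closure is replaced by an iterative DFS over an explicit stack of (node, parent) frames; the visited-check moves from call time to pop time and the parent-skip moves to push time.
-- outside the precondition, e.g. on undirected_cycle_test([[1, 1, 9], [0, 0]]): A returns True, B returns True
import Mathlib
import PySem

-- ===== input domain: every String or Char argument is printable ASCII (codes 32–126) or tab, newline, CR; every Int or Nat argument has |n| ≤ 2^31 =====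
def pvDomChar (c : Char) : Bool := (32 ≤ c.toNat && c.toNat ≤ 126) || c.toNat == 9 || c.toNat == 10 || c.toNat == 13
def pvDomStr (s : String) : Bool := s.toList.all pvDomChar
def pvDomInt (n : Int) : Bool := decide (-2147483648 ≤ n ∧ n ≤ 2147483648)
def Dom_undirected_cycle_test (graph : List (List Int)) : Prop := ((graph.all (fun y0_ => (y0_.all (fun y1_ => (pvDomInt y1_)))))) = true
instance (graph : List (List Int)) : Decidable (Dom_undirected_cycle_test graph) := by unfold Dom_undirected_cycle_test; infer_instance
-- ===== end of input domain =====

-- B replaces A's recursive DFS by an iterative DFS with an explicit (node, parent) stack; same cost, different decomposition.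


-- ===== PORT A =====
-- A's recursive helper `visit` mutates the shared `visited` list, so the port threads it
-- through and returns (result, visited).  Indexing is Python-exact via PySem (negative
-- in-range indices wrap).  The Nat argument is fuel, a totality guard only: under Pre_ the
-- recursion depth is bounded by graph.length + 1, the fuel the port supplies, so the
-- fuel-exhausted branch is never reached (the equivalence proof never crosses it).
mutual
def pvVisitA (graph : List (List Int)) (f : Nat) (node from_node : Int) (vis : List Bool) :
    Bool × List Bool :=
  match f with
  | 0 => (true, vis)
  | f + 1 =>
      if PySem.List.pyGetD vis node false then (true, vis)
      else pvLoopA graph f (PySem.List.pyGetD graph node []) from_node node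
        (PySem.List.pySetD vis node true)
termination_by (f, 0)

-- the `for neighbor in graph[node]` loop of `visit`
def pvLoopA (graph : List (List Int)) (f : Nat) (ns : List Int) (from_node node : Int)
    (vis : List Bool) : Bool × List Bool :=
  match ns with
  | [] => (false, vis)
  | n :: rest =>
      if n = from_node then pvLoopA graph f rest from_node node vis
      else
        match pvVisitA graph f n node vis with
        | (true, v) => (true, v)
        | (false, v) => pvLoopA graph f rest from_node node v
termination_by (f, ns.length + 1)
end

def undirected_cycle_test (graph : List (List Int)) : Bool :=
  (pvVisitA graph (graph.length + 1) 0 0 (List.replicate graph.length false)).1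

-- ===== PORT B =====
-- frames pushed for graph[node]'s non-parent neighbours; Python appends reversed(graph[node])
-- to the stack's tail, which with a head-is-top stack is exactly this prepend in row order
def pvPush (graph : List (List Int)) (node parent : Int) : List (Int × Int) :=
  (PySem.List.pyGetD graph node []).filterMap
    (fun n => if n = parent then none else some (n, node))

def pvMaxRow (graph : List (List Int)) : Nat :=
  graph.foldr (fun l a => max l.length a) 0

-- the `while stack:` loop; the Nat argument is fuel, a totality guard only (the fuel
-- supplied below provably suffices under Pre_)
def pvLoopB (graph : List (List Int)) : Nat → List (Int × Int) → List Bool → Bool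
  | _, [], _ => false
  | 0, _ :: _, _ => true
  | f + 1, (node, parent) :: stack, vis =>
      if PySem.List.pyGetD vis node false then true
      else pvLoopB graph f (pvPush graph node parent ++ stack)
        (PySem.List.pySetD vis node true)

def undirected_cycle_test_alt (graph : List (List Int)) : Bool :=
  pvLoopB graph (graph.length * (pvMaxRow graph + 1) + 2) [((0 : Int), (0 : Int))]
    (List.replicate graph.length false)

-- ===== PRECONDITION & SPEC =====
-- Python's xs[v] index, already known in range: wrap a negative v to v + len
def pvWrap (L : Nat) (v : Int) : Nat := (if v < 0 then v + L else v).toNat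

-- one expansion of the set of indices reachable from node 0 (plain transitive closure over
-- the adjacency rows — no visited flags, no parent skip, no early exit, unlike the DFS)
def pvReachStep (graph : List (List Int)) (S : List Nat) : List Nat :=
  S.foldl (fun acc u =>
    (graph.getD u []).foldl (fun acc2 v =>
      if -(graph.length : Int) ≤ v ∧ v < graph.length then
        (if pvWrap graph.length v ∈ acc2 then acc2 else acc2 ++ [pvWrap graph.length v])
      else acc2) acc) S

-- the indices reachable from node 0 (graph.length expansions saturate the closure)
def pvReach (graph : List (List Int)) : List Nat :=
  (pvReachStep graph)^[graph.length] [0]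

-- Pre_ excludes the empty graph and graphs where an adjacency entry of a row reachable from
-- node 0 is out of Python's index range [-len, len): on those A raises IndexError, except
-- when the invalid entry is only touched after the DFS has already answered (skipped as a
-- parent edge or behind an early True) — those accidental returns are excluded with it.
def Pre_undirected_cycle_test (graph : List (List Int)) : Prop :=
  graph ≠ [] ∧ ∀ u ∈ pvReach graph, ∀ v ∈ graph.getD u [],
    -(graph.length : Int) ≤ v ∧ v < graph.length
instance (graph : List (List Int)) : Decidable (Pre_undirected_cycle_test graph) := by
  unfold Pre_undirected_cycle_test; infer_instance

def pvWitness_undirected_cycle_test : List (List Int) := [[1], [0]]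

def Spec_undirected_cycle_test (graph : List (List Int)) (out : Bool) : Prop := out = undirected_cycle_test_alt graph
instance (graph : List (List Int)) (out : Bool) : Decidable (Spec_undirected_cycle_test graph out) := by unfold Spec_undirected_cycle_test; infer_instance

-- ===== CLAIM (what is proved, stated in full; the proofs are below) =====
def Claim_equal_undirected_cycle_test : Prop := ∀ (graph : List (List Int)), Dom_undirected_cycle_test graph → Pre_undirected_cycle_test graph → Spec_undirected_cycle_test graph (undirected_cycle_test graph)

-- ===== LEMMAS AND PROOFS =====

-- canonical sufficient fuel for pvLoopB at a given state
def pvBf (graph : List (List Int)) (s : List (Int × Int)) (vis : List Bool) : Nat :=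
  s.length + vis.count false * (pvMaxRow graph + 1) + 1

-- a frame value is valid: it is in Python index range and its slot is reachable
def pvOk (graph : List (List Int)) (v : Int) : Prop :=
  -(graph.length : Int) ≤ v ∧ v < graph.length ∧ pvWrap graph.length v ∈ pvReach graph

lemma pv_idx_wrap (L : Nat) (v : Int) (h1 : -(L : Int) ≤ v) (h2 : v < L) :
    PySem.List.pyIdx? L v = some (pvWrap L v) := by
  unfold PySem.List.pyIdx? pvWrap
  by_cases h0 : 0 ≤ v
  · have hv : ¬ v < 0 := by omega
    simp [h0, h2, hv]
  · have hv : v < 0 := by omega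
    have h4 : L - (-v).toNat = (v + L).toNat := by omega
    simp [h0, h1, hv, h4]

lemma pv_pyGetD_wrap {α : Type} (xs : List α) (v : Int) (d : α)
    (h1 : -(xs.length : Int) ≤ v) (h2 : v < xs.length) :
    PySem.List.pyGetD xs v d = xs.getD (pvWrap xs.length v) d := by
  simp [PySem.List.pyGetD, PySem.List.pyGet?, pv_idx_wrap xs.length v h1 h2, List.getD]

lemma pv_pySetD_wrap {α : Type} (xs : List α) (v : Int) (a : α)
    (h1 : -(xs.length : Int) ≤ v) (h2 : v < xs.length) :
    PySem.List.pySetD xs v a = xs.set (pvWrap xs.length v) a := by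
  simp [PySem.List.pySetD, PySem.List.pySet?, pv_idx_wrap xs.length v h1 h2]

lemma pv_wrap_lt {L : Nat} {v : Int} (h1 : -(L : Int) ≤ v) (h2 : v < L) :
    pvWrap L v < L := by
  unfold pvWrap
  split <;> omega

lemma pv_count_set : ∀ (vis : List Bool) (i : Nat), i < vis.length →
    vis.getD i false = false → (vis.set i true).count false + 1 = vis.count false := by
  intro vis
  induction vis with
  | nil => intro i h; simp at h
  | cons b t ih =>
    intro i hi hb
    cases i with
    | zero => simp_all
    | succ j =>
      have := ih j (by simpa using hi) (by simpa [List.getD] using hb)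
      simp only [List.set, List.count_cons]
      omega

lemma pv_count_set_le : ∀ (vis : List Bool) (i : Nat),
    (vis.set i true).count false ≤ vis.count false := by
  intro vis
  induction vis with
  | nil => intro i; simp
  | cons b t ih =>
    intro i
    cases i with
    | zero => cases b <;> simp
    | succ j => have := ih j; simp only [List.set, List.count_cons]; omega

-- PySem.List.pySetD is either a no-op or a List.set (used for the count bound)
lemma pv_pySetD_cases {α : Type} (xs : List α) (v : Int) (a : α) :
    PySem.List.pySetD xs v a = xs ∨ ∃ k, PySem.List.pySetD xs v a = xs.set k a := by
  unfold PySem.List.pySetD PySem.List.pySet? PySem.List.pyIdx?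
  split
  · split
    · exact Or.inr ⟨_, rfl⟩
    · exact Or.inl rfl
  · split
    · exact Or.inr ⟨_, rfl⟩
    · exact Or.inl rfl

lemma pv_pySetD_count_le (xs : List Bool) (v : Int) :
    (PySem.List.pySetD xs v true).count false ≤ xs.count false := by
  rcases pv_pySetD_cases xs v true with h | ⟨k, h⟩
  · rw [h]
  · rw [h]; exact pv_count_set_le xs k

lemma pv_pySetD_length {α : Type} (xs : List α) (v : Int) (a : α) :
    (PySem.List.pySetD xs v a).length = xs.length := by
  rcases pv_pySetD_cases xs v a with h | ⟨k, h⟩ <;> simp [h]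

lemma pv_row_mem {graph : List (List Int)} {i : Nat} (hi : i < graph.length) :
    graph.getD i [] ∈ graph := by
  have h : graph.getD i [] = graph[i] := by
    simp [List.getD, List.getElem?_eq_getElem hi]
  rw [h]; exact List.getElem_mem hi

lemma pv_row_le_max {graph : List (List Int)} {l : List Int} (h : l ∈ graph) :
    l.length ≤ pvMaxRow graph := by
  induction graph with
  | nil => simp at h
  | cons r t ih =>
    rcases List.mem_cons.mp h with h | h
    · simp [pvMaxRow, h]
    · have := ih h
      simp only [pvMaxRow, List.foldr_cons] at *
      omega

-- ---- facts about the reachable-index closure pvReach ----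

lemma pv_foldl_prefix {α β : Type} (f : List α → β → List α)
    (h : ∀ acc b, ∃ t, f acc b = acc ++ t) :
    ∀ (l : List β) (acc : List α), ∃ t, l.foldl f acc = acc ++ t := by
  intro l
  induction l with
  | nil => intro acc; exact ⟨[], by simp⟩
  | cons b rest ih =>
    intro acc
    rcases h acc b with ⟨t1, h1⟩
    rcases ih (f acc b) with ⟨t2, h2⟩
    refine ⟨t1 ++ t2, ?_⟩
    rw [List.foldl_cons, h2, h1, List.append_assoc]

lemma pv_inner_prefix (graph : List (List Int)) (vs : List Int) (acc : List Nat) :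
    ∃ t, vs.foldl (fun acc2 v =>
      if -(graph.length : Int) ≤ v ∧ v < graph.length then
        (if pvWrap graph.length v ∈ acc2 then acc2 else acc2 ++ [pvWrap graph.length v])
      else acc2) acc = acc ++ t := by
  apply pv_foldl_prefix
  intro acc2 v
  split
  · split
    · exact ⟨[], by simp⟩
    · exact ⟨_, rfl⟩
  · exact ⟨[], by simp⟩

lemma pv_step_prefix (graph : List (List Int)) (S : List Nat) :
    ∃ t, pvReachStep graph S = S ++ t := by
  unfold pvReachStep
  apply pv_foldl_prefix
  intro acc u
  exact pv_inner_prefix graph (graph.getD u []) acc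

-- good accumulator: nodup, all entries < graph.length
lemma pv_inner_good (graph : List (List Int)) (vs : List Int) :
    ∀ acc : List Nat, acc.Nodup → (∀ x ∈ acc, x < graph.length) →
    (vs.foldl (fun acc2 v =>
      if -(graph.length : Int) ≤ v ∧ v < graph.length then
        (if pvWrap graph.length v ∈ acc2 then acc2 else acc2 ++ [pvWrap graph.length v])
      else acc2) acc).Nodup ∧
    ∀ x ∈ vs.foldl (fun acc2 v =>
      if -(graph.length : Int) ≤ v ∧ v < graph.length then
        (if pvWrap graph.length v ∈ acc2 then acc2 else acc2 ++ [pvWrap graph.length v])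
      else acc2) acc, x < graph.length := by
  induction vs with
  | nil => intro acc h1 h2; exact ⟨h1, h2⟩
  | cons v rest ih =>
    intro acc h1 h2
    simp only [List.foldl_cons]
    split
    · rename_i hin
      split
      · exact ih acc h1 h2
      · rename_i hmem
        apply ih
        · simp only [List.nodup_append, List.nodup_cons, List.nodup_nil, and_true]
          refine ⟨h1, by simp, ?_⟩
          intro a ha b hb heq
          rw [List.mem_singleton.mp hb] at heq
          exact hmem (heq ▸ ha)
        · intro x hx
          rcases List.mem_append.mp hx with hx | hx
          · exact h2 x hx
          · have : x = pvWrap graph.length v := by simpa using hx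
            rw [this]; exact pv_wrap_lt hin.1 hin.2
    · exact ih acc h1 h2

lemma pv_outer_good (graph : List (List Int)) :
    ∀ (l : List Nat) (acc : List Nat), acc.Nodup → (∀ x ∈ acc, x < graph.length) →
      (l.foldl (fun acc u =>
        (graph.getD u []).foldl (fun acc2 v =>
          if -(graph.length : Int) ≤ v ∧ v < graph.length then
            (if pvWrap graph.length v ∈ acc2 then acc2 else acc2 ++ [pvWrap graph.length v])
          else acc2) acc) acc).Nodup ∧
      ∀ x ∈ l.foldl (fun acc u =>
        (graph.getD u []).foldl (fun acc2 v =>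
          if -(graph.length : Int) ≤ v ∧ v < graph.length then
            (if pvWrap graph.length v ∈ acc2 then acc2 else acc2 ++ [pvWrap graph.length v])
          else acc2) acc) acc, x < graph.length := by
  intro l
  induction l with
  | nil => intro acc h1 h2; exact ⟨h1, h2⟩
  | cons u rest ih =>
    intro acc h1 h2
    simp only [List.foldl_cons]
    have h3 := pv_inner_good graph (graph.getD u []) acc h1 h2
    exact ih _ h3.1 h3.2

lemma pv_step_good (graph : List (List Int)) :
    ∀ S : List Nat, S.Nodup → (∀ x ∈ S, x < graph.length) →
    (pvReachStep graph S).Nodup ∧ ∀ x ∈ pvReachStep graph S, x < graph.length := by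
  intro S h1 h2
  unfold pvReachStep
  exact pv_outer_good graph S S h1 h2

lemma pv_outer_prefix (graph : List (List Int)) (l : List Nat) (acc : List Nat) :
    ∃ t, l.foldl (fun acc u =>
      (graph.getD u []).foldl (fun acc2 v =>
        if -(graph.length : Int) ≤ v ∧ v < graph.length then
          (if pvWrap graph.length v ∈ acc2 then acc2 else acc2 ++ [pvWrap graph.length v])
        else acc2) acc) acc = acc ++ t := by
  apply pv_foldl_prefix
  intro acc2 u
  exact pv_inner_prefix graph (graph.getD u []) acc2

lemma pv_inner_mem (graph : List (List Int)) {v : Int}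
    (hin : -(graph.length : Int) ≤ v ∧ v < graph.length) :
    ∀ (vs : List Int) (acc : List Nat), v ∈ vs →
    pvWrap graph.length v ∈ vs.foldl (fun acc2 w =>
      if -(graph.length : Int) ≤ w ∧ w < graph.length then
        (if pvWrap graph.length w ∈ acc2 then acc2 else acc2 ++ [pvWrap graph.length w])
      else acc2) acc := by
  intro vs
  induction vs with
  | nil => intro acc h; simp at h
  | cons w rest ih =>
    intro acc hv
    simp only [List.foldl_cons]
    rcases List.mem_cons.mp hv with hv | hv
    · subst hv
      have hstep : pvWrap graph.length v ∈
          (if -(graph.length : Int) ≤ v ∧ v < graph.length then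
            (if pvWrap graph.length v ∈ acc then acc else acc ++ [pvWrap graph.length v])
          else acc) := by
        rw [if_pos hin]
        split
        · assumption
        · simp
      rcases pv_inner_prefix graph rest (if -(graph.length : Int) ≤ v ∧ v < graph.length then
          (if pvWrap graph.length v ∈ acc then acc else acc ++ [pvWrap graph.length v])
          else acc) with ⟨t, ht⟩
      rw [ht]
      exact List.mem_append.mpr (Or.inl hstep)
    · exact ih _ hv

lemma pv_mem_step (graph : List (List Int)) {u : Nat} {v : Int} (S : List Nat)
    (hu : u ∈ S) (hv : v ∈ graph.getD u [])
    (hin : -(graph.length : Int) ≤ v ∧ v < graph.length) :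
    pvWrap graph.length v ∈ pvReachStep graph S := by
  unfold pvReachStep
  have go : ∀ (l : List Nat) (acc : List Nat), u ∈ l →
      pvWrap graph.length v ∈ l.foldl (fun acc u =>
        (graph.getD u []).foldl (fun acc2 w =>
          if -(graph.length : Int) ≤ w ∧ w < graph.length then
            (if pvWrap graph.length w ∈ acc2 then acc2 else acc2 ++ [pvWrap graph.length w])
          else acc2) acc) acc := by
    intro l
    induction l with
    | nil => intro acc h; simp at h
    | cons u0 rest ih =>
      intro acc hul
      simp only [List.foldl_cons]
      rcases List.mem_cons.mp hul with hul | hul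
      · subst hul
        rcases pv_outer_prefix graph rest ((graph.getD u []).foldl (fun acc2 w =>
            if -(graph.length : Int) ≤ w ∧ w < graph.length then
              (if pvWrap graph.length w ∈ acc2 then acc2 else acc2 ++ [pvWrap graph.length w])
            else acc2) acc) with ⟨t, ht⟩
        rw [ht]
        exact List.mem_append.mpr (Or.inl (pv_inner_mem graph hin (graph.getD u []) acc hv))
      · exact ih _ hul
  exact go S S hu

lemma pv_iter_good (graph : List (List Int)) (hL : 0 < graph.length) (k : Nat) :
    ((pvReachStep graph)^[k] [0]).Nodup ∧
    ∀ x ∈ (pvReachStep graph)^[k] [0], x < graph.length := by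
  induction k with
  | zero => exact ⟨by simp, by simpa using hL⟩
  | succ k ih =>
    rw [Function.iterate_succ_apply']
    exact pv_step_good graph _ ih.1 ih.2

lemma pv_reach_zero (graph : List (List Int)) : ∀ k, (0 : Nat) ∈ (pvReachStep graph)^[k] [0] := by
  intro k
  induction k with
  | zero => simp
  | succ k ih =>
    rw [Function.iterate_succ_apply']
    rcases pv_step_prefix graph ((pvReachStep graph)^[k] [0]) with ⟨t, ht⟩
    rw [ht]
    exact List.mem_append.mpr (Or.inl ih)

lemma pv_nodup_length_le {S : List Nat} {L : Nat} (h : S.Nodup) (hs : ∀ x ∈ S, x < L) :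
    S.length ≤ L := by
  have h2 : S ⊆ List.range L := by intro x hx; exact List.mem_range.mpr (hs x hx)
  have := List.Subperm.length_le (List.subperm_of_subset h h2)
  simpa using this

lemma pv_reach_fix (graph : List (List Int)) (hL : 0 < graph.length) :
    pvReachStep graph (pvReach graph) = pvReach graph := by
  have Q : ∀ k, pvReachStep graph ((pvReachStep graph)^[k] [0]) = (pvReachStep graph)^[k] [0] ∨
      k + 1 ≤ ((pvReachStep graph)^[k] [0]).length := by
    intro k
    induction k with
    | zero => exact Or.inr (by simp)
    | succ k ih =>
      rcases ih with ih | ih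
      · left
        rw [Function.iterate_succ_apply', ih, ih]
      · by_cases hfix : pvReachStep graph ((pvReachStep graph)^[k] [0]) = (pvReachStep graph)^[k] [0]
        · left
          rw [Function.iterate_succ_apply', hfix, hfix]
        · right
          rcases pv_step_prefix graph ((pvReachStep graph)^[k] [0]) with ⟨t, ht⟩
          have htne : t ≠ [] := by
            intro h0
            rw [h0, List.append_nil] at ht
            exact hfix ht
          rw [Function.iterate_succ_apply', ht]
          have : 1 ≤ t.length := List.length_pos_iff.mpr htne
          simp only [List.length_append]
          omega
  rcases Q graph.length with h | h
  · exact h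
  · exfalso
    have hg := pv_iter_good graph hL graph.length
    have := pv_nodup_length_le hg.1 hg.2
    omega

lemma pv_reach_closed (graph : List (List Int)) (hL : 0 < graph.length) {u : Nat} {v : Int}
    (hu : u ∈ pvReach graph) (hv : v ∈ graph.getD u [])
    (hin : -(graph.length : Int) ≤ v ∧ v < graph.length) :
    pvWrap graph.length v ∈ pvReach graph := by
  rw [← pv_reach_fix graph hL]
  exact pv_mem_step graph (pvReach graph) hu hv hin

-- pvVisitA / pvLoopA preserve the visited-list length and never unmark a node
lemma pv_monoA (graph : List (List Int)) : ∀ f : Nat,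
    (∀ (node from_node : Int) (vis : List Bool),
      (pvVisitA graph f node from_node vis).2.length = vis.length ∧
      (pvVisitA graph f node from_node vis).2.count false ≤ vis.count false) ∧
    (∀ (ns : List Int) (from_node node : Int) (vis : List Bool),
      (pvLoopA graph f ns from_node node vis).2.length = vis.length ∧
      (pvLoopA graph f ns from_node node vis).2.count false ≤ vis.count false) := by
  intro f
  induction f with
  | zero =>
    refine ⟨by intro node fn vis; simp [pvVisitA], ?_⟩
    intro ns fn node vis
    induction ns generalizing vis with
    | nil => simp [pvLoopA]
    | cons n rest ih =>
      simp only [pvLoopA]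
      split
      · exact ih vis
      · simp [pvVisitA]
  | succ f ih =>
    have hV : ∀ (node from_node : Int) (vis : List Bool),
        (pvVisitA graph (f + 1) node from_node vis).2.length = vis.length ∧
        (pvVisitA graph (f + 1) node from_node vis).2.count false ≤ vis.count false := by
      intro node fn vis
      simp only [pvVisitA]
      split
      · exact ⟨rfl, le_refl _⟩
      · have h := ih.2 (PySem.List.pyGetD graph node []) fn node (PySem.List.pySetD vis node true)
        refine ⟨by rw [h.1]; exact pv_pySetD_length vis node true, ?_⟩
        exact le_trans h.2 (pv_pySetD_count_le vis node)
    refine ⟨hV, ?_⟩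
    intro ns fn node vis
    induction ns generalizing vis with
    | nil => simp [pvLoopA]
    | cons n rest ihn =>
      simp only [pvLoopA]
      split
      · exact ihn vis
      · rcases h : pvVisitA graph (f + 1) n node vis with ⟨b, v⟩
        have hv := hV n node vis
        rw [h] at hv
        cases b
        · have h2 := ihn v
          exact ⟨by rw [h2.1]; exact hv.1, le_trans h2.2 hv.2⟩
        · exact hv

lemma pv_push_wf {graph : List (List Int)} (hL : 0 < graph.length)
    (HPre : ∀ u ∈ pvReach graph, ∀ v ∈ graph.getD u [],
      -(graph.length : Int) ≤ v ∧ v < graph.length)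
    {node parent : Int} (hn : pvOk graph node) :
    (pvPush graph node parent).length ≤ pvMaxRow graph ∧
    ∀ p ∈ pvPush graph node parent, pvOk graph p.1 := by
  rcases hn with ⟨hn1, hn2, hnR⟩
  have hwlt : pvWrap graph.length node < graph.length := pv_wrap_lt hn1 hn2
  have hrowe : PySem.List.pyGetD graph node [] = graph.getD (pvWrap graph.length node) [] :=
    pv_pyGetD_wrap graph node [] hn1 hn2
  have hrow : graph.getD (pvWrap graph.length node) [] ∈ graph := pv_row_mem hwlt
  constructor
  · unfold pvPush
    rw [hrowe]
    exact le_trans (List.length_filterMap_le _ _) (pv_row_le_max hrow)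
  · intro p hp
    unfold pvPush at hp
    rw [hrowe] at hp
    rcases List.mem_filterMap.mp hp with ⟨n, hnmem, hsome⟩
    by_cases hpar : n = parent
    · simp [hpar] at hsome
    · simp only [hpar, if_false, Option.some.injEq] at hsome
      have hin := HPre _ hnR n hnmem
      subst hsome
      exact ⟨hin.1, hin.2, pv_reach_closed graph hL hnR hnmem hin⟩

-- pvLoopB's fuel guard is irrelevant once the fuel reaches the canonical bound pvBf
lemma pv_loopB_irrel (graph : List (List Int)) (hL : 0 < graph.length)
    (HPre : ∀ u ∈ pvReach graph, ∀ v ∈ graph.getD u [],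
      -(graph.length : Int) ≤ v ∧ v < graph.length) :
    ∀ (f₁ f₂ : Nat) (s : List (Int × Int)) (vis : List Bool),
      vis.length = graph.length →
      (∀ p ∈ s, pvOk graph p.1) →
      pvBf graph s vis ≤ f₁ → pvBf graph s vis ≤ f₂ →
      pvLoopB graph f₁ s vis = pvLoopB graph f₂ s vis := by
  intro f₁
  induction f₁ with
  | zero => intro f₂ s vis _ _ h1 _; simp [pvBf] at h1
  | succ f₁ ih =>
    intro f₂ s vis hlen hwf h1 h2
    match s with
    | [] => cases f₂ <;> simp [pvLoopB]
    | (node, parent) :: stack =>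
      have hf2 : ∃ f₂', f₂ = f₂' + 1 := by
        cases f₂
        · exfalso; simp [pvBf] at h2
        · exact ⟨_, rfl⟩
      rcases hf2 with ⟨f₂', rfl⟩
      simp only [pvLoopB]
      split
      · rfl
      · rename_i hvisd
        have hnode := hwf (node, parent) (List.mem_cons_self ..)
        have hb1 : -(vis.length : Int) ≤ node := by rw [hlen]; exact hnode.1
        have hb2 : node < vis.length := by rw [hlen]; exact hnode.2.1
        have hset : PySem.List.pySetD vis node true = vis.set (pvWrap vis.length node) true :=
          pv_pySetD_wrap vis node true hb1 hb2
        have hget : PySem.List.pyGetD vis node false =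
            vis.getD (pvWrap vis.length node) false := pv_pyGetD_wrap vis node false hb1 hb2
        have hwlt : pvWrap vis.length node < vis.length := pv_wrap_lt hb1 hb2
        have hcount := pv_count_set vis (pvWrap vis.length node) hwlt
          (by rw [← hget]; simpa using hvisd)
        have hpush := pv_push_wf hL HPre (node := node) (parent := parent) hnode
        have hwf' : ∀ p ∈ pvPush graph node parent ++ stack, pvOk graph p.1 := by
          intro p hp
          rcases List.mem_append.mp hp with hp | hp
          · exact hpush.2 p hp
          · exact hwf p (List.mem_cons_of_mem _ hp)
        rw [hset]
        apply ih f₂'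
        · rw [List.length_set, hlen]
        · exact hwf'
        · simp only [pvBf, List.length_append, List.length_cons] at h1 ⊢
          nlinarith [hpush.1, hcount]
        · simp only [pvBf, List.length_append, List.length_cons] at h2 ⊢
          nlinarith [hpush.1, hcount]

-- main simulation: one recursive visit equals processing the corresponding frame on B's stack
lemma pv_sim (graph : List (List Int)) (hL : 0 < graph.length)
    (HPre : ∀ u ∈ pvReach graph, ∀ v ∈ graph.getD u [],
      -(graph.length : Int) ≤ v ∧ v < graph.length) :
    ∀ f : Nat, ∀ (node from_node : Int) (vis : List Bool) (stack : List (Int × Int)),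
      vis.length = graph.length → pvOk graph node →
      (∀ p ∈ stack, pvOk graph p.1) →
      vis.count false < f →
      ∀ fB : Nat, pvBf graph ((node, from_node) :: stack) vis ≤ fB →
      pvLoopB graph fB ((node, from_node) :: stack) vis =
        (if (pvVisitA graph f node from_node vis).1 then true
         else pvLoopB graph (pvBf graph stack (pvVisitA graph f node from_node vis).2) stack
           (pvVisitA graph f node from_node vis).2) := by
  intro f
  induction f with
  | zero => intro node fn vis stack _ _ _ hc; omega
  | succ f ih =>
    intro node fn vis stack hlen hnode hst hc fB hfB
    have hfb1 : ∃ fB', fB = fB' + 1 := by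
      cases fB
      · exfalso; simp [pvBf] at hfB
      · exact ⟨_, rfl⟩
    rcases hfb1 with ⟨fB', rfl⟩
    by_cases hvisd : PySem.List.pyGetD vis node false
    · simp only [pvVisitA, pvLoopB, hvisd, if_true]
    · have hb1 : -(vis.length : Int) ≤ node := by rw [hlen]; exact hnode.1
      have hb2 : node < vis.length := by rw [hlen]; exact hnode.2.1
      have hget : PySem.List.pyGetD vis node false =
          vis.getD (pvWrap vis.length node) false := pv_pyGetD_wrap vis node false hb1 hb2
      have hset : PySem.List.pySetD vis node true = vis.set (pvWrap vis.length node) true :=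
        pv_pySetD_wrap vis node true hb1 hb2
      have hwlt : pvWrap vis.length node < vis.length := pv_wrap_lt hb1 hb2
      have hcount := pv_count_set vis (pvWrap vis.length node) hwlt
        (by rw [← hget]; simpa using hvisd)
      have hpush := pv_push_wf hL HPre (node := node) (parent := fn) hnode
      have hrowe : PySem.List.pyGetD graph node [] =
          graph.getD (pvWrap graph.length node) [] :=
        pv_pyGetD_wrap graph node [] hnode.1 hnode.2.1
      simp only [pvVisitA, pvLoopB, hvisd, if_false, Bool.false_eq_true]
      have hnsOk : ∀ v ∈ PySem.List.pyGetD graph node [], pvOk graph v := by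
        intro v hv
        rw [hrowe] at hv
        have hwr : pvWrap graph.length node ∈ pvReach graph := hnode.2.2
        have hin := HPre _ hwr v hv
        exact ⟨hin.1, hin.2, pv_reach_closed graph hL hwr hv hin⟩
      have key : ∀ (ns : List Int), (∀ v ∈ ns, pvOk graph v) →
          ∀ (vis' : List Bool) (stack' : List (Int × Int)),
          vis'.length = graph.length →
          (∀ p ∈ stack', pvOk graph p.1) →
          vis'.count false < f →
          ∀ fB'' : Nat,
          pvBf graph ((ns.filterMap fun n => if n = fn then none else some (n, node)) ++ stack') vis' ≤ fB'' →
          pvLoopB graph fB''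
              ((ns.filterMap fun n => if n = fn then none else some (n, node)) ++ stack') vis' =
            (if (pvLoopA graph f ns fn node vis').1 then true
             else pvLoopB graph (pvBf graph stack' (pvLoopA graph f ns fn node vis').2) stack'
               (pvLoopA graph f ns fn node vis').2) := by
        intro ns
        induction ns with
        | nil =>
          intro _ vis' stack' hlen' hst' _ fB'' hfB''
          simp only [List.filterMap_nil, List.nil_append, pvLoopA]
          exact pv_loopB_irrel graph hL HPre fB'' _ stack' vis' hlen' hst'
            (by simpa using hfB'') le_rfl
        | cons n rest ihn =>
          intro hns vis' stack' hlen' hst' hc' fB'' hfB''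
          by_cases hpar : n = fn
          · simp only [List.filterMap_cons, hpar, pvLoopA]
            exact ihn (fun v hv => hns v (List.mem_cons_of_mem _ hv)) vis' stack' hlen' hst' hc' fB''
              (by simpa [hpar] using hfB'')
          · have hn := hns n (List.mem_cons_self ..)
            have hstack2 : ∀ p ∈ (rest.filterMap fun m => if m = fn then none else some (m, node)) ++ stack',
                pvOk graph p.1 := by
              intro p hp
              rcases List.mem_append.mp hp with hp | hp
              · rcases List.mem_filterMap.mp hp with ⟨m, hm, hsome⟩
                by_cases h' : m = fn
                · simp [h'] at hsome
                · simp only [h', if_false, Option.some.injEq] at hsome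
                  subst hsome
                  exact hns m (List.mem_cons_of_mem _ hm)
              · exact hst' p hp
            have happ : ((n :: rest).filterMap fun m => if m = fn then none else some (m, node)) ++ stack'
                = (n, node) :: ((rest.filterMap fun m => if m = fn then none else some (m, node)) ++ stack') := by
              simp [hpar]
            rw [happ] at hfB'' ⊢
            rw [ih n node vis' _ hlen' hn hstack2 hc' fB'' hfB'']
            rcases hv : pvVisitA graph f n node vis' with ⟨b, v⟩
            have hmono := (pv_monoA graph f).1 n node vis'
            rw [hv] at hmono
            cases b with
            | false =>
              -- visit returned False with updated visited v: continue the loop on rest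
              have hstep : pvLoopA graph f (n :: rest) fn node vis' =
                  pvLoopA graph f rest fn node v := by
                simp [pvLoopA, hpar, hv]
              rw [hstep]
              exact ihn (fun m hm => hns m (List.mem_cons_of_mem _ hm)) v stack'
                (by rw [hmono.1, hlen']) hst' (lt_of_le_of_lt hmono.2 hc')
                (pvBf graph ((rest.filterMap fun m => if m = fn then none else some (m, node)) ++ stack') v)
                le_rfl
            | true =>
              have hstep : pvLoopA graph f (n :: rest) fn node vis' = (true, v) := by
                simp [pvLoopA, hpar, hv]
              rw [hstep]
              rfl
      have hc1 : (PySem.List.pySetD vis node true).count false < f := by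
        rw [hset]; omega
      have hbf : pvBf graph (pvPush graph node fn ++ stack) (PySem.List.pySetD vis node true) ≤ fB' := by
        rw [hset]
        simp only [pvBf, List.length_append, List.length_cons] at hfB ⊢
        nlinarith [hpush.1, hcount]
      have hlen2 : (PySem.List.pySetD vis node true).length = graph.length := by
        rw [pv_pySetD_length, hlen]
      exact key (PySem.List.pyGetD graph node []) hnsOk
        (PySem.List.pySetD vis node true) stack hlen2 hst hc1 fB' hbf

-- ===== VERDICT (by name: the statement is the Claim_ definition above) =====
theorem undirected_cycle_test_spec : Claim_equal_undirected_cycle_test := by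
  intro graph _ hpre
  rcases hpre with ⟨hne, HPre⟩
  have hL : 0 < graph.length := List.length_pos_iff.mpr hne
  unfold Spec_undirected_cycle_test undirected_cycle_test undirected_cycle_test_alt
  have hrep : (List.replicate graph.length false).count false = graph.length := by simp
  have h0 : pvOk graph 0 := by
    refine ⟨by omega, by omega, ?_⟩
    have : pvWrap graph.length 0 = 0 := by simp [pvWrap]
    rw [this]
    exact pv_reach_zero graph graph.length
  have h := pv_sim graph hL HPre (graph.length + 1) 0 0 (List.replicate graph.length false) []
    (by simp) h0 (by simp) (by omega)
    (graph.length * (pvMaxRow graph + 1) + 2)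
    (by simp [pvBf, hrep]; ring_nf; omega)
  rw [h]
  rcases hres : pvVisitA graph (graph.length + 1) 0 0 (List.replicate graph.length false) with ⟨b, v⟩
  cases b <;> simp [pvLoopB]
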